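-- pv_equiv track=rewrite | github.com/Chaiyuangungun/PanTFBS | TFBS.py | get_TF_Gene
-- ===== SOURCE A (Python) =====
-- def get_TF_Gene(new_promoter_TF_sites,TF_ids):##new_promoter_TF_sites[gene_id][TF_id]
--     TF_Gene_ids = {}
--     for id in TF_ids:
--         TF_Gene_ids[id] = []
--         for gene_id in new_promoter_TF_sites:
--             for TF_id in new_promoter_TF_sites[gene_id] :
--                 if TF_id == id:
--                     TF_Gene_ids[id].append(gene_id)
--     return TF_Gene_ids
-- ===== SOURCE B (Python) =====
-- def get_TF_Gene(new_promoter_TF_sites, TF_ids):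
--     occ = {}
--     for gene_id in new_promoter_TF_sites:
--         for TF_id in new_promoter_TF_sites[gene_id]:
--             occ.setdefault(TF_id, []).append(gene_id)
--     return {id: occ.get(id, []) for id in TF_ids}
-- ===== Notes on version B (the rewrite author's own statement) =====
-- stated objective: faster
-- what changed: B builds an inverted index TF->genes in one pass over the genes (setdefault/append), then forms the result by a dict comprehension over TF_ids looking each id up once, instead of A's rescan of every gene's whole TF dict once per TF id.
import Mathlib
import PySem

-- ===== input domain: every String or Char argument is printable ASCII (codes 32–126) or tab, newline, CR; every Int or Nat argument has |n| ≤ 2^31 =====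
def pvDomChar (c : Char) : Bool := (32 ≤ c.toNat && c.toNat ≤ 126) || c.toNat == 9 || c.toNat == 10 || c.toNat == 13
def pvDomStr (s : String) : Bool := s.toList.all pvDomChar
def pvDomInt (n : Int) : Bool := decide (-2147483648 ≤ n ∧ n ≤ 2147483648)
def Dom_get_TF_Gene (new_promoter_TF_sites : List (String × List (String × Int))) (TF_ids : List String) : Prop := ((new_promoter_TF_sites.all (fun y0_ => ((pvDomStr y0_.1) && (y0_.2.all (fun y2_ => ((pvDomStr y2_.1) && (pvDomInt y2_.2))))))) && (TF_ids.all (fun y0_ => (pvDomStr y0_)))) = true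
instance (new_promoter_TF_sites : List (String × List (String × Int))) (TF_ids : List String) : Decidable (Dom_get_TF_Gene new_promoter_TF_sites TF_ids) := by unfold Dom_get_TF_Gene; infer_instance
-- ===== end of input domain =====

-- B builds an inverted index TF -> genes in ONE pass over the genes (setdefault/append),
-- then forms the answer by a dict comprehension over TF_ids with a single lookup per id.

-- ===== PORT A =====
-- for id in TF_ids: TF_Gene_ids[id] = []; for gene_id in sites: for TF_id in sites[gene_id]: if TF_id == id: append gene_id
def get_TF_Gene (new_promoter_TF_sites : List (String × List (String × Int))) (TF_ids : List String) : List (String × List String) :=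
  (TF_ids.foldl (fun acc id =>
      (PySem.Dict.ofList new_promoter_TF_sites).keys.foldl (fun acc gene_id =>
          (PySem.Dict.ofList ((PySem.Dict.ofList new_promoter_TF_sites).getD gene_id [])).keys.foldl (fun acc TF_id =>
              if TF_id == id then acc.modify id [] (fun l => l ++ [gene_id]) else acc)
            acc)
        (acc.insert id []))
    PySem.Dict.empty).items

-- ===== PORT B =====
-- occ = {}; for gene_id in sites: for TF_id in sites[gene_id]: occ.setdefault(TF_id, []).append(gene_id)
def pvIndexB (new_promoter_TF_sites : List (String × List (String × Int))) : PySem.Dict String (List String) :=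
  (PySem.Dict.ofList new_promoter_TF_sites).keys.foldl (fun occ gene_id =>
      (PySem.Dict.ofList ((PySem.Dict.ofList new_promoter_TF_sites).getD gene_id [])).keys.foldl
        (fun occ TF_id => occ.modify TF_id [] (fun l => l ++ [gene_id])) occ)
    PySem.Dict.empty

-- return {id: occ.get(id, []) for id in TF_ids}
def get_TF_Gene_alt (new_promoter_TF_sites : List (String × List (String × Int))) (TF_ids : List String) : List (String × List String) :=
  (TF_ids.foldl (fun acc id => acc.insert id ((pvIndexB new_promoter_TF_sites).getD id []))
    PySem.Dict.empty).items

-- ===== PRECONDITION & SPEC =====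
def Spec_get_TF_Gene (new_promoter_TF_sites : List (String × List (String × Int))) (TF_ids : List String) (out : List (String × List String)) : Prop := out = get_TF_Gene_alt new_promoter_TF_sites TF_ids
instance (new_promoter_TF_sites : List (String × List (String × Int))) (TF_ids : List String) (out : List (String × List String)) : Decidable (Spec_get_TF_Gene new_promoter_TF_sites TF_ids out) := by unfold Spec_get_TF_Gene; infer_instance

-- ===== CLAIM (what is proved, stated in full; the proofs are below) =====
def Claim_equal_get_TF_Gene : Prop := ∀ (new_promoter_TF_sites : List (String × List (String × Int))) (TF_ids : List String), Dom_get_TF_Gene new_promoter_TF_sites TF_ids → Spec_get_TF_Gene new_promoter_TF_sites TF_ids (get_TF_Gene new_promoter_TF_sites TF_ids)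

-- ===== LEMMAS AND PROOFS =====

-- a dict over the distinct keys S whose value at k is v k
def canonD (S : List String) (v : String → List String) : PySem.Dict String (List String) :=
  PySem.Dict.mk (S.map (fun k => (k, v k)))

-- the (TF, gene) occurrence pairs, in the traversal order shared by both ports
def pairsOf (new_promoter_TF_sites : List (String × List (String × Int))) : List (String × String) :=
  (PySem.Dict.ofList new_promoter_TF_sites).keys.flatMap (fun gene_id =>
    (PySem.Dict.ofList ((PySem.Dict.ofList new_promoter_TF_sites).getD gene_id [])).keys.map (fun TF_id => (TF_id, gene_id)))

-- the genes containing a given TF, in traversal order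
def bucketsOf (new_promoter_TF_sites : List (String × List (String × Int))) (id : String) : List String :=
  ((pairsOf new_promoter_TF_sites).filter (fun p => p.1 == id)).map (fun p => p.2)

lemma canonD_keys (S : List String) (v : String → List String) : (canonD S v).keys = S := by
  simp only [canonD, PySem.Dict.keys, List.map_map]
  exact List.map_id'' (congrFun rfl) S

lemma canonD_contains (S : List String) (v : String → List String) (k : String) :
    (canonD S v).contains k = decide (k ∈ S) := by
  rw [PySem.Dict.contains_eq_decide_mem_keys, canonD_keys]

lemma canonD_insert_mem (S : List String) (v : String → List String) (k : String)
    (w : List String) (hk : k ∈ S) :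
    (canonD S v).insert k w = canonD S (Function.update v k w) := by
  have hc : (canonD S v).contains k = true := by rw [canonD_contains]; simpa
  apply PySem.Dict.ext
  rw [PySem.Dict.items_insert_of_contains _ _ hc]
  simp only [canonD, List.map_map]
  apply List.map_congr_left
  intro j hj
  by_cases h : j = k
  · subst h; simp [Function.comp]
  · simp [Function.comp, h]

lemma canonD_insert_not_mem (S : List String) (v : String → List String) (k : String)
    (w : List String) (hk : k ∉ S) :
    (canonD S v).insert k w = canonD (S ++ [k]) (Function.update v k w) := by
  have hc : (canonD S v).contains k = false := by rw [canonD_contains]; simpa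
  apply PySem.Dict.ext
  rw [PySem.Dict.items_insert_of_not_contains _ _ hc]
  simp only [canonD, List.map_append, List.map_singleton, Function.update_self]
  congr 1
  apply List.map_congr_left
  intro j hj
  have h : j ≠ k := fun e => hk (e ▸ hj)
  simp [h]

lemma insert_insert_self (d : PySem.Dict String (List String)) (k : String)
    (v w : List String) : (d.insert k v).insert k w = d.insert k w := by
  apply PySem.Dict.ext
  have hc : (d.insert k v).contains k = true := PySem.Dict.contains_insert_self d k v
  rw [PySem.Dict.items_insert_of_contains _ _ hc]
  by_cases h : d.contains k = true
  · rw [PySem.Dict.items_insert_of_contains _ _ h, PySem.Dict.items_insert_of_contains _ _ h, List.map_map]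
    apply List.map_congr_left; intro p hp
    by_cases hpk : (p.1 == k) = true <;> simp [Function.comp, hpk]
  · have h' : d.contains k = false := by simpa using h
    rw [PySem.Dict.items_insert_of_not_contains _ _ h', PySem.Dict.items_insert_of_not_contains _ _ h']
    simp only [List.map_append, List.map_singleton, beq_self_eq_true, if_pos]
    congr 1
    have hm : k ∉ d.keys := by
      rw [PySem.Dict.contains_eq_decide_mem_keys] at h'
      simpa using h'
    have hall : ∀ p ∈ d.items, (fun p : String × List String => if (p.1 == k) = true then (k, w) else p) p = id p := by
      intro p hp
      have : (p.1 == k) = false := beq_eq_false_iff_ne.2 (fun e => hm (e ▸ List.mem_map_of_mem hp))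
      simp [this]
    rw [List.map_congr_left hall, List.map_id]

lemma foldl_flatMap {α β γ : Type} (l : List α) (f : α → List β) (g : γ → β → γ) :
    ∀ init, (l.flatMap f).foldl g init = l.foldl (fun a x => (f x).foldl g a) init := by
  induction l with
  | nil => intro init; rfl
  | cons x xs ih => intro init; simp [List.flatMap_cons, List.foldl_append, ih]

-- A's flattened per-id loop: every hit appends to the same freshly reset bucket
lemma A_step (id : String) : ∀ (P : List (String × String)) (acc : PySem.Dict String (List String)) (v0 : List String),
    P.foldl (fun acc p => if p.1 == id then acc.modify id [] (fun l => l ++ [p.2]) else acc) (acc.insert id v0)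
      = acc.insert id (v0 ++ (P.filter (fun p => p.1 == id)).map (fun p => p.2)) := by
  intro P
  induction P with
  | nil => intro acc v0; simp
  | cons p rest ih =>
    intro acc v0
    by_cases hp : (p.1 == id) = true
    · simp only [List.foldl_cons, hp, if_pos]
      have hmod : (acc.insert id v0).modify id [] (fun l => l ++ [p.2]) = acc.insert id (v0 ++ [p.2]) := by
        rw [PySem.Dict.modify, PySem.Dict.getD_insert_self, insert_insert_self]
      rw [hmod, ih]
      simp [hp, List.append_assoc]
    · simp only [List.foldl_cons, hp, if_neg, Bool.false_eq_true, not_false_iff]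
      rw [ih]
      simp [hp]

-- the id loop, inserting a value that depends only on the id
lemma ids_loop (F : String → List String) : ∀ (ids : List String) (S : List String), S.Nodup →
    ids.foldl (fun acc id => acc.insert id (F id)) (canonD S F) = canonD (PySem.Set.update S ids) F := by
  intro ids
  induction ids with
  | nil => intro S hS; rfl
  | cons id rest ih =>
    intro S hS
    rw [PySem.Set.update, List.foldl_cons, List.foldl_cons]
    by_cases hm : id ∈ S
    · have hadd : PySem.Set.add S id = S := by
        rw [PySem.Set.add]; simp [hm]
      rw [canonD_insert_mem S F id _ hm, Function.update_eq_self, hadd]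
      exact ih S hS
    · have hadd : PySem.Set.add S id = S ++ [id] := by
        rw [PySem.Set.add]; simp [hm]
      rw [canonD_insert_not_mem S F id _ hm, Function.update_eq_self, hadd]
      refine ih _ ?_
      rw [List.nodup_append]
      exact ⟨hS, List.nodup_singleton id, by simpa using fun a ha e => hm ((e : a = id) ▸ ha)⟩

-- a double loop over genes and their TFs is the single loop over the occurrence pairs
lemma double_eq_pairs (new_promoter_TF_sites : List (String × List (String × Int)))
    (body : PySem.Dict String (List String) → String → String → PySem.Dict String (List String))
    (acc0 : PySem.Dict String (List String)) :
    (PySem.Dict.ofList new_promoter_TF_sites).keys.foldl (fun acc gene_id =>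
        (PySem.Dict.ofList ((PySem.Dict.ofList new_promoter_TF_sites).getD gene_id [])).keys.foldl
          (fun acc TF_id => body acc TF_id gene_id) acc) acc0
      = (pairsOf new_promoter_TF_sites).foldl (fun acc p => body acc p.1 p.2) acc0 := by
  rw [pairsOf, foldl_flatMap]
  simp [List.foldl_map]

lemma A_char (new_promoter_TF_sites : List (String × List (String × Int))) (TF_ids : List String) :
    get_TF_Gene new_promoter_TF_sites TF_ids
      = (canonD (PySem.Set.ofList TF_ids) (bucketsOf new_promoter_TF_sites)).items := by
  unfold get_TF_Gene
  have hstep : (fun (acc : PySem.Dict String (List String)) (id : String) =>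
      (PySem.Dict.ofList new_promoter_TF_sites).keys.foldl (fun acc gene_id =>
          (PySem.Dict.ofList ((PySem.Dict.ofList new_promoter_TF_sites).getD gene_id [])).keys.foldl
            (fun acc TF_id => if TF_id == id then acc.modify id [] (fun l => l ++ [gene_id]) else acc) acc)
        (acc.insert id []))
      = (fun (acc : PySem.Dict String (List String)) (id : String) =>
          acc.insert id (bucketsOf new_promoter_TF_sites id)) := by
    funext acc id
    rw [double_eq_pairs new_promoter_TF_sites
          (fun acc TF_id gene_id => if TF_id == id then acc.modify id [] (fun l => l ++ [gene_id]) else acc)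
          (acc.insert id [])]
    rw [A_step id (pairsOf new_promoter_TF_sites) acc []]
    rw [List.nil_append]
    rfl
  rw [hstep]
  have : PySem.Dict.empty = canonD [] (bucketsOf new_promoter_TF_sites) := rfl
  rw [this, ids_loop (bucketsOf new_promoter_TF_sites) TF_ids [] List.nodup_nil]
  rfl

-- the value of the inverted-index fold at any key, over an arbitrary pair list and start dict
lemma getD_pairs_fold : ∀ (P : List (String × String)) (d : PySem.Dict String (List String)) (k : String),
    (P.foldl (fun occ p => occ.modify p.1 [] (fun l => l ++ [p.2])) d).getD k []
      = d.getD k [] ++ (P.filter (fun p => p.1 == k)).map (fun p => p.2) := by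
  intro P
  induction P with
  | nil => intro d k; simp
  | cons p rest ih =>
    intro d k
    rw [List.foldl_cons, ih]
    by_cases h : (p.1 == k) = true
    · have hk : k = p.1 := (eq_of_beq h).symm
      rw [PySem.Dict.getD_modify]
      simp [hk, List.append_assoc]
    · rw [PySem.Dict.getD_modify]
      have hk : ¬ k = p.1 := fun e => h (by simp [e])
      simp [hk, h]

-- the inverted index holds exactly the bucket of every id (empty for an absent id)
lemma pvIndexB_getD (new_promoter_TF_sites : List (String × List (String × Int))) (id : String) :
    (pvIndexB new_promoter_TF_sites).getD id [] = bucketsOf new_promoter_TF_sites id := by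
  unfold pvIndexB
  rw [double_eq_pairs new_promoter_TF_sites
        (fun occ TF_id gene_id => occ.modify TF_id [] (fun l => l ++ [gene_id])) PySem.Dict.empty]
  rw [getD_pairs_fold (pairsOf new_promoter_TF_sites) PySem.Dict.empty id]
  rw [PySem.Dict.getD_empty, List.nil_append]
  rfl

lemma B_char (new_promoter_TF_sites : List (String × List (String × Int))) (TF_ids : List String) :
    get_TF_Gene_alt new_promoter_TF_sites TF_ids
      = (canonD (PySem.Set.ofList TF_ids) (bucketsOf new_promoter_TF_sites)).items := by
  unfold get_TF_Gene_alt
  have hfun : (fun (acc : PySem.Dict String (List String)) (id : String) =>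
        acc.insert id ((pvIndexB new_promoter_TF_sites).getD id []))
      = (fun (acc : PySem.Dict String (List String)) (id : String) =>
        acc.insert id (bucketsOf new_promoter_TF_sites id)) := by
    funext acc id
    rw [pvIndexB_getD]
  rw [hfun]
  have : PySem.Dict.empty = canonD [] (bucketsOf new_promoter_TF_sites) := rfl
  rw [this, ids_loop (bucketsOf new_promoter_TF_sites) TF_ids [] List.nodup_nil]
  rfl

-- ===== VERDICT (by name: the statement is the Claim_ definition above) =====
theorem get_TF_Gene_spec : Claim_equal_get_TF_Gene := by
  intro new_promoter_TF_sites TF_ids _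
  show get_TF_Gene new_promoter_TF_sites TF_ids = get_TF_Gene_alt new_promoter_TF_sites TF_ids
  rw [A_char, B_char]
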